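-- pv_equiv track=rewrite | github.com/amanchourasiya/leetcode | algoexpert/squareOfZeros.py | createHelperMatrix
-- ===== SOURCE A (Python) =====
-- def createHelperMatrix(matrix):
--     l = len(matrix)
--     newMatrix = [[(0,0) for _ in range(l)] for _ in range(l)]
--
--     for row in range(l-1, -1, -1):
--         for col in range(l-1, -1, -1):
--             if matrix[row][col] != 1:
--                 right = 1
--                 down = 1
--                 if row < l-1:
--                     down = 1 + newMatrix[row+1][col][0]
--                 if col < l-1:
--                     right = 1 + newMatrix[row][col+1][1]
--
--                 newMatrix[row][col] = (down, right)
--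
--     return newMatrix
-- ===== SOURCE B (Python) =====
-- def run(vals):
--     n = 0
--     for v in vals:
--         if v == 1:
--             break
--         n += 1
--     return n
--
-- def createHelperMatrix(matrix):
--     l = len(matrix)
--     return [[(0, 0) if matrix[r][c] == 1 else
--              (run([matrix[i][c] for i in range(r, l)]), run(matrix[r][c:l]))
--              for c in range(l)]
--             for r in range(l)]
-- ===== Notes on version B (the rewrite author's own statement) =====
-- stated objective: alternative
-- what changed: Replaces the bottom-up in-place DP table with a direct per-cell computation: each (down,right) pair is the length of the run of non-1 values counted straight down the column and along the row, so no mutable helper matrix and no dependence between cells.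
import Mathlib
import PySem

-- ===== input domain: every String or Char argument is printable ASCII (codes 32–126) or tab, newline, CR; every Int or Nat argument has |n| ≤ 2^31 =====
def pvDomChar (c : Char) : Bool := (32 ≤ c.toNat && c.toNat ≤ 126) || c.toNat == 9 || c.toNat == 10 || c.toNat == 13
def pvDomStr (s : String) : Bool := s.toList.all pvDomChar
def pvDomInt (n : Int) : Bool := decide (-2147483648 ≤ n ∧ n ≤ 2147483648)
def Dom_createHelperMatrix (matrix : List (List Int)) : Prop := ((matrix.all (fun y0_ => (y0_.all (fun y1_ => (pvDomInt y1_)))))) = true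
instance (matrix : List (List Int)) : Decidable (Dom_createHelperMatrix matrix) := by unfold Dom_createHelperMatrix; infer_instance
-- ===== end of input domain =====

-- B replaces A's bottom-up in-place DP table by a direct per-cell count of the
-- run of non-1 values down the column and along the row (alternative algorithm, same results).


-- ===== PORT A =====
def createHelperMatrix (matrix : List (List Int)) : List (List (Int × Int)) :=
  let l : Int := PySem.List.len matrix
  let newMatrix : List (List (Int × Int)) :=
    (PySem.List.pyRange 0 l 1).map (fun _ =>
      (PySem.List.pyRange 0 l 1).map (fun _ => ((0:Int), (0:Int))))
  (PySem.List.pyRange (l-1) (-1) (-1)).foldl (fun nm row =>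
    (PySem.List.pyRange (l-1) (-1) (-1)).foldl (fun nm col =>
      if PySem.List.pyGetD (PySem.List.pyGetD matrix row []) col 0 ≠ 1 then
        let right : Int := 1
        let down : Int := 1
        let down : Int :=
          if row < l - 1 then
            1 + (PySem.List.pyGetD (PySem.List.pyGetD nm (row+1) []) col ((0:Int),(0:Int))).1
          else down
        let right : Int :=
          if col < l - 1 then
            1 + (PySem.List.pyGetD (PySem.List.pyGetD nm row []) (col+1) ((0:Int),(0:Int))).2
          else right
        PySem.List.pySetD nm row
          (PySem.List.pySetD (PySem.List.pyGetD nm row []) col (down, right))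
      else nm) nm) newMatrix

-- ===== PORT B =====
def pyRun : List Int → Int
  | [] => 0
  | v :: rest => if v ≠ 1 then 1 + pyRun rest else 0

def createHelperMatrix_alt (matrix : List (List Int)) : List (List (Int × Int)) :=
  let l : Int := PySem.List.len matrix
  (PySem.List.pyRange 0 l 1).map (fun r =>
    (PySem.List.pyRange 0 l 1).map (fun c =>
      if PySem.List.pyGetD (PySem.List.pyGetD matrix r []) c 0 = 1 then ((0:Int),(0:Int))
      else (pyRun ((PySem.List.pyRange r l 1).map (fun i =>
              PySem.List.pyGetD (PySem.List.pyGetD matrix i []) c 0)),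
            pyRun (PySem.List.slice (PySem.List.pyGetD matrix r []) (some c) (some l)))))

-- ===== PRECONDITION & SPEC =====
-- A raises IndexError exactly when some row is shorter than len(matrix); Pre_ excludes only those inputs.
def Pre_createHelperMatrix (matrix : List (List Int)) : Prop :=
  ∀ row ∈ matrix, matrix.length ≤ row.length
instance (matrix : List (List Int)) : Decidable (Pre_createHelperMatrix matrix) := by
  unfold Pre_createHelperMatrix; infer_instance
def pvWitness_createHelperMatrix : List (List Int) := [[0, 1], [1, 0]]

def Spec_createHelperMatrix (matrix : List (List Int)) (out : List (List (Int × Int))) : Prop := out = createHelperMatrix_alt matrix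
instance (matrix : List (List Int)) (out : List (List (Int × Int))) : Decidable (Spec_createHelperMatrix matrix out) := by unfold Spec_createHelperMatrix; infer_instance

-- ===== CLAIM (what is proved, stated in full; the proofs are below) =====
def Claim_equal_createHelperMatrix : Prop := ∀ (matrix : List (List Int)), Dom_createHelperMatrix matrix → Pre_createHelperMatrix matrix → Spec_createHelperMatrix matrix (createHelperMatrix matrix)

-- ===== LEMMAS AND PROOFS =====
-- Common functional characterisation: the DP row by row, bottom up.  `rowCalc` computes
-- one result row from the zipped (value, cell-below) list; `specGo` chains the rows.
def rowCalc : List (Int × (Int × Int)) → List (Int × Int)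
  | [] => []
  | (v, b) :: rest =>
      (if v = 1 then ((0:Int),(0:Int))
       else (1 + b.1, 1 + ((rowCalc rest).headD ((0:Int),(0:Int))).2)) :: rowCalc rest

def specGo (n : Nat) : List (List Int) → List (List (Int × Int))
  | [] => []
  | m :: rest =>
      rowCalc ((m.take n).zip ((specGo n rest).headD (List.replicate n ((0:Int),(0:Int)))))
        :: specGo n rest

theorem rowCalc_length (L : List (Int × (Int × Int))) : (rowCalc L).length = L.length := by
  induction L with
  | nil => rfl
  | cons h t ih => cases h; simp [rowCalc, ih]

theorem headD_rowCalc_snd (L : List (Int × (Int × Int))) :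
    ((rowCalc L).headD ((0:Int),(0:Int))).2 = pyRun (L.map Prod.fst) := by
  induction L with
  | nil => rfl
  | cons h t ih =>
    cases h with
    | mk v b =>
      by_cases hv : v = 1
      · simp [rowCalc, pyRun, hv]
      · simp only [rowCalc, hv, if_false, List.headD_cons, List.map_cons]
        rw [pyRun]
        simp only [ne_eq, hv, not_false_iff, if_pos]
        simpa using ih

theorem rowCalc_getD (L : List (Int × (Int × Int))) (c : Nat) (h : c < L.length)
    (d : Int × Int) :
    (rowCalc L).getD c d =
      if L[c].1 = 1 then ((0:Int),(0:Int))
      else (1 + L[c].2.1, 1 + pyRun ((L.drop (c+1)).map Prod.fst)) := by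
  induction L generalizing c with
  | nil => simp at h
  | cons hd t ih =>
    cases hd with
    | mk v b =>
      cases c with
      | zero =>
        simp only [rowCalc, List.getD_cons_zero, List.getElem_cons_zero, List.drop_succ_cons,
          List.drop_zero]
        rw [headD_rowCalc_snd]
      | succ c =>
        simp only [List.length_cons, Nat.succ_lt_succ_iff] at h
        simp only [rowCalc, List.getD_cons_succ, List.getElem_cons_succ, List.drop_succ_cons]
        exact ih c h

theorem length_specGo (n : Nat) (rows : List (List Int)) :
    (specGo n rows).length = rows.length := by
  induction rows with
  | nil => rfl
  | cons m rest ih => simp [specGo, ih]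

theorem belowD_length (n : Nat) (rows : List (List Int))
    (h : ∀ r ∈ specGo n rows, r.length = n) :
    ((specGo n rows).headD (List.replicate n ((0:Int),(0:Int)))).length = n := by
  cases hrest : specGo n rows with
  | nil => simp
  | cons x xs =>
    have := h x (by simp [hrest])
    simp [this]

theorem specGo_row_length (n : Nat) (rows : List (List Int))
    (h : ∀ m ∈ rows, n ≤ m.length) :
    ∀ r ∈ specGo n rows, r.length = n := by
  induction rows with
  | nil => simp [specGo]
  | cons m rest ih =>
    intro r hr
    simp only [specGo, List.mem_cons] at hr
    rcases hr with hr | hr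
    · subst hr
      have hm : n ≤ m.length := h m (List.mem_cons_self ..)
      have hbelow := belowD_length n rest (ih (fun m hm => h m (List.mem_cons_of_mem _ hm)))
      rw [rowCalc_length, List.length_zip, List.length_take, hbelow]
      omega
    · exact ih (fun m hm => h m (List.mem_cons_of_mem _ hm)) r hr

theorem specGo_drop (n : Nat) (rows : List (List Int)) (r : Nat) :
    (specGo n rows).drop r = specGo n (rows.drop r) := by
  induction rows generalizing r with
  | nil => simp [specGo]
  | cons m rest ih =>
    cases r with
    | zero => simp
    | succ r => simpa [specGo] using ih r

theorem down_head (n : Nat) (rows : List (List Int))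
    (h : ∀ m ∈ rows, n ≤ m.length) (c : Nat) (hc : c < n) :
    (((specGo n rows).headD (List.replicate n ((0:Int),(0:Int)))).getD c ((0:Int),(0:Int))).1
      = pyRun (rows.map (fun m => m.getD c 0)) := by
  induction rows with
  | nil => simp [specGo, pyRun, hc]
  | cons m rest ih =>
    have hrest : ∀ m ∈ rest, n ≤ m.length := fun m hm => h m (List.mem_cons_of_mem _ hm)
    have hm : n ≤ m.length := h m (List.mem_cons_self ..)
    have hbl : ((specGo n rest).headD (List.replicate n ((0:Int),(0:Int)))).length = n :=
      belowD_length n rest (specGo_row_length n rest hrest)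
    set below := (specGo n rest).headD (List.replicate n ((0:Int),(0:Int))) with hbdef
    have hcL : c < ((m.take n).zip below).length := by
      rw [List.length_zip, List.length_take, hbl]; omega
    have hget : ((m.take n).zip below)[c] = (m[c]'(by omega), below[c]'(by omega)) := by
      simp [List.getElem_zip, List.getElem_take]
    have hmc : m.getD c 0 = m[c]'(by omega) := List.getD_eq_getElem m 0 (by omega)
    have hbc : below.getD c ((0:Int),(0:Int)) = below[c]'(by omega) :=
      List.getD_eq_getElem below _ (by omega)
    simp only [specGo, List.headD_cons, List.map_cons, ← hbdef]
    rw [rowCalc_getD _ c hcL, hget, pyRun, hmc]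
    by_cases hv : m[c]'(by omega) = 1
    · simp [hv]
    · simp only [hv, if_false, ne_eq, not_false_iff, if_pos]
      rw [← hbc, ih hrest]

theorem alt_eq_spec (matrix : List (List Int))
    (hpre : ∀ row ∈ matrix, matrix.length ≤ row.length) :
    createHelperMatrix_alt matrix = specGo matrix.length matrix := by
  set n := matrix.length with hn
  have hB : createHelperMatrix_alt matrix =
      (List.range n).map (fun (r : Nat) => (List.range n).map (fun (c : Nat) =>
        if PySem.List.pyGetD (PySem.List.pyGetD matrix (↑r) []) (↑c) 0 = 1 then ((0:Int),(0:Int))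
        else (pyRun ((PySem.List.pyRange (↑r) (↑n) 1).map (fun i =>
                PySem.List.pyGetD (PySem.List.pyGetD matrix i []) (↑c) 0)),
              pyRun (PySem.List.slice (PySem.List.pyGetD matrix (↑r) []) (some ↑c) (some ↑n))))) := by
    rw [createHelperMatrix_alt]
    simp only [PySem.List.len_eq, ← hn, PySem.List.pyRange_zero_nat, List.map_map]
    simp [Function.comp_def]
  rw [hB]
  apply List.ext_getElem
  · simp [length_specGo, hn]
  intro r hr1 hr2
  simp only [List.length_map, List.length_range] at hr1
  have hrn : r < n := hr1
  have hrm : r < matrix.length := hrn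
  -- the spec row
  have hdrop : matrix.drop r = matrix[r] :: matrix.drop (r+1) := List.drop_eq_getElem_cons hrm
  have hrowlen : n ≤ matrix[r].length := hpre _ (List.getElem_mem hrm)
  have hpre' : ∀ row ∈ matrix.drop (r+1), n ≤ row.length :=
    fun row hrow => hpre row (List.mem_of_mem_drop hrow)
  have hbl : ((specGo n (matrix.drop (r+1))).headD (List.replicate n ((0:Int),(0:Int)))).length = n :=
    belowD_length n _ (specGo_row_length n _ hpre')
  set below := (specGo n (matrix.drop (r+1))).headD (List.replicate n ((0:Int),(0:Int))) with hbdef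
  set L := (matrix[r].take n).zip below with hLdef
  have hLlen : L.length = n := by
    rw [hLdef, List.length_zip, List.length_take, hbl]; omega
  have hspecrow : (specGo n matrix)[r]'(by rw [length_specGo]; omega) = rowCalc L := by
    have h0 : ((specGo n matrix).drop r)[0]'(by rw [List.length_drop, length_specGo]; omega)
        = (specGo n matrix)[r]'(by rw [length_specGo]; omega) := by
      simp
    rw [← h0]
    have : (specGo n matrix).drop r = rowCalc L :: specGo n (matrix.drop (r+1)) := by
      rw [specGo_drop, hdrop, specGo]
    simp [this]
  rw [hspecrow, List.getElem_map, List.getElem_range]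
  -- rows: lengths agree
  apply List.ext_getElem
  · simp [rowCalc_length, hLlen]
  intro c hc1 hc2
  simp only [List.length_map, List.length_range] at hc1
  have hcn : c < n := hc1
  rw [List.getElem_map, List.getElem_range]
  -- simplify B's matrix lookups
  have hmr : PySem.List.pyGetD matrix (↑r) [] = matrix[r] := by
    rw [PySem.List.pyGetD_natCast, List.getD_eq_getElem _ _ hrm]
  have hmc : PySem.List.pyGetD matrix[r] (↑c) 0 = matrix[r][c]'(by omega) := by
    rw [PySem.List.pyGetD_natCast, List.getD_eq_getElem _ _ (by omega)]
  -- spec cell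
  have hcell : (rowCalc L)[c]'(by rw [rowCalc_length, hLlen]; omega)
      = (rowCalc L).getD c ((0:Int),(0:Int)) := by
    rw [List.getD_eq_getElem _ _ (by rw [rowCalc_length, hLlen]; omega)]
  have hLc : L[c]'(by omega) = (matrix[r][c]'(by omega), below[c]'(by omega)) := by
    simp [hLdef, List.getElem_zip, List.getElem_take]
  rw [hcell, rowCalc_getD _ c (by omega), hLc, hmr, hmc]
  by_cases hv : matrix[r][c]'(by omega) = 1
  · simp [hv]
  · simp only [hv, if_false]
    refine congrArg₂ Prod.mk ?_ ?_
    · -- down component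
      have hcol : (PySem.List.pyRange (↑r) (↑n) 1).map (fun i =>
            PySem.List.pyGetD (PySem.List.pyGetD matrix i []) (↑c) 0)
          = (matrix.drop r).map (fun m => m.getD c 0) := by
        have h1 : (PySem.List.pyRange (↑r) (↑n) 1).map (fun i => PySem.List.pyGetD matrix i [])
            = matrix.drop r := by
          have := PySem.List.map_pyGetD_pyRange' matrix [] (a := (↑r : Int)) (by positivity)
          simpa [hn] using this
        calc (PySem.List.pyRange (↑r) (↑n) 1).map (fun i =>
                PySem.List.pyGetD (PySem.List.pyGetD matrix i []) (↑c) 0)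
            = ((PySem.List.pyRange (↑r) (↑n) 1).map (fun i => PySem.List.pyGetD matrix i [])).map
                (fun m => PySem.List.pyGetD m (↑c) 0) := by rw [List.map_map]; rfl
          _ = (matrix.drop r).map (fun m => PySem.List.pyGetD m (↑c) 0) := by rw [h1]
          _ = (matrix.drop r).map (fun m => m.getD c 0) := by
                simp [PySem.List.pyGetD_natCast]
      rw [hcol, hdrop, List.map_cons, pyRun]
      have hdn := down_head n (matrix.drop (r+1)) hpre' c hcn
      rw [← hbdef] at hdn
      have hbc : below.getD c ((0:Int),(0:Int)) = below[c]'(by omega) :=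
        List.getD_eq_getElem below _ (by omega)
      rw [hbc] at hdn
      rw [List.getD_eq_getElem _ _ (by omega : c < matrix[r].length), if_pos hv, hdn]
    · -- right component
      have hslice : PySem.List.slice matrix[r] (some ↑c) (some ↑n)
          = (matrix[r].drop c).take (n - c) := PySem.List.slice_natCast _ c n
      have hdropc : matrix[r].drop c = (matrix[r][c]'(by omega)) :: matrix[r].drop (c+1) :=
        List.drop_eq_getElem_cons (by omega)
      have hmapfst : L.map Prod.fst = matrix[r].take n := by
        rw [hLdef]
        exact List.map_fst_zip (by rw [List.length_take, hbl]; omega)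
      have hR : (L.drop (c+1)).map Prod.fst = (matrix[r].drop (c+1)).take (n - (c+1)) := by
        rw [List.map_drop, hmapfst, List.drop_take]
      rw [hR, hslice, hdropc, show n - c = (n - (c+1)) + 1 by omega, List.take_succ_cons, pyRun,
        if_pos hv]

def innerG (matrix : List (List Int)) (l row : Int) (nm : List (List (Int × Int)))
    (col : Int) : List (List (Int × Int)) :=
  if PySem.List.pyGetD (PySem.List.pyGetD matrix row []) col 0 ≠ 1 then
    let right : Int := 1
    let down : Int := 1
    let down : Int :=
      if row < l - 1 then
        1 + (PySem.List.pyGetD (PySem.List.pyGetD nm (row+1) []) col ((0:Int),(0:Int))).1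
      else down
    let right : Int :=
      if col < l - 1 then
        1 + (PySem.List.pyGetD (PySem.List.pyGetD nm row []) (col+1) ((0:Int),(0:Int))).2
      else right
    PySem.List.pySetD nm row
      (PySem.List.pySetD (PySem.List.pyGetD nm row []) col (down, right))
  else nm

theorem A_unfold (matrix : List (List Int)) :
    createHelperMatrix matrix =
      (PySem.List.pyRange (PySem.List.len matrix - 1) (-1) (-1)).foldl (fun nm row =>
        (PySem.List.pyRange (PySem.List.len matrix - 1) (-1) (-1)).foldl
          (innerG matrix (PySem.List.len matrix) row) nm)
        ((PySem.List.pyRange 0 (PySem.List.len matrix) 1).map (fun _ =>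
          (PySem.List.pyRange 0 (PySem.List.len matrix) 1).map (fun _ => ((0:Int),(0:Int))))) :=
  rfl

theorem getD_zero_headD {α : Type} (l : List α) (d : α) : l.getD 0 d = l.headD d := by
  cases l <;> rfl

theorem repcons_getD {α : Type} (k : Nat) (z x : α) (T : List α) (d : α) :
    (List.replicate k z ++ x :: T).getD k d = x := by
  simp [List.getD_eq_getElem?_getD, List.getElem?_append_right]

theorem repcons_getD_succ {α : Type} (k : Nat) (z x : α) (T : List α) (d : α) :
    (List.replicate k z ++ x :: T).getD (k+1) d = T.getD 0 d := by
  rw [List.getD_eq_getElem?_getD, List.getElem?_append_right (by simp)]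
  simp [List.getD_eq_getElem?_getD, show k + 1 - k = 1 by omega]

theorem rep_succ_append {α : Type} (c : Nat) (z : α) (T : List α) :
    List.replicate (c+1) z ++ T = List.replicate c z ++ z :: T := by
  rw [List.replicate_succ', List.append_assoc]; rfl

theorem repcons_set {α : Type} (k : Nat) (z x v : α) (T : List α) :
    (List.replicate k z ++ x :: T).set k v = List.replicate k z ++ v :: T := by
  rw [List.set_append]
  simp

theorem map_const_pyRange {α : Type} (n : Nat) (x : α) :
    (PySem.List.pyRange 0 (↑n) 1).map (fun _ => x) = List.replicate n x := by
  rw [PySem.List.pyRange_zero_nat, List.map_map]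
  have : ((fun _ => x) ∘ (fun (k : Nat) => (↑k : Int))) = fun (_ : Nat) => x := rfl
  rw [this, List.map_const', List.length_range]

theorem inner_inv (matrix : List (List Int))
    (hpre : ∀ row ∈ matrix, matrix.length ≤ row.length) (k : Nat) (hk : k < matrix.length) :
    ∀ c : Nat, c ≤ matrix.length →
      (PySem.List.pyRange ((c:Int) - 1) (-1) (-1)).foldl
          (innerG matrix (↑matrix.length) (↑k))
          (List.replicate k (List.replicate matrix.length ((0:Int),(0:Int))) ++
            (List.replicate c ((0:Int),(0:Int)) ++
              rowCalc ((((matrix[k]'hk).take matrix.length).zip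
                ((specGo matrix.length (matrix.drop (k+1))).headD
                  (List.replicate matrix.length ((0:Int),(0:Int))))).drop c)) ::
            specGo matrix.length (matrix.drop (k+1)))
        = List.replicate k (List.replicate matrix.length ((0:Int),(0:Int))) ++
            rowCalc (((matrix[k]'hk).take matrix.length).zip
              ((specGo matrix.length (matrix.drop (k+1))).headD
                (List.replicate matrix.length ((0:Int),(0:Int))))) ::
            specGo matrix.length (matrix.drop (k+1)) := by
  set n := matrix.length with hn
  have hrowlen : n ≤ (matrix[k]'hk).length := hpre _ (List.getElem_mem hk)
  have hpre' : ∀ row ∈ matrix.drop (k+1), n ≤ row.length :=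
    fun row hrow => hpre row (List.mem_of_mem_drop hrow)
  set R := specGo n (matrix.drop (k+1)) with hRdef
  have hbl : (R.headD (List.replicate n ((0:Int),(0:Int)))).length = n :=
    belowD_length n _ (specGo_row_length n _ hpre')
  set below := R.headD (List.replicate n ((0:Int),(0:Int))) with hbdef
  set L := ((matrix[k]'hk).take n).zip below with hLdef
  have hLlen : L.length = n := by
    rw [hLdef, List.length_zip, List.length_take, hbl]; omega
  have hRlen : R.length = n - (k+1) := by
    rw [hRdef, length_specGo, List.length_drop]
  intro c
  induction c with
  | zero =>
    intro _
    rw [show ((0:Nat):Int) - 1 = -1 by norm_num, PySem.List.pyRange_neg_one_eq_nil le_rfl]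
    simp
  | succ c ih =>
    intro hc
    have hcn : c < n := hc
    have hcast : ((c+1 : Nat) : Int) - 1 = (c : Nat) := by push_cast; ring
    rw [hcast, PySem.List.pyRange_neg_one_cons (by omega : (-1:Int) < (c:Nat)),
      List.foldl_cons]
    have hLc : L[c]'(by omega) = ((matrix[k]'hk)[c]'(by omega), below[c]'(by omega)) := by
      simp [hLdef, List.getElem_zip, List.getElem_take]
    have hLdropc : L.drop c = L[c]'(by omega) :: L.drop (c+1) :=
      List.drop_eq_getElem_cons (by omega)
    have hstep : innerG matrix (↑n) (↑k)
        (List.replicate k (List.replicate n ((0:Int),(0:Int))) ++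
          (List.replicate (c+1) ((0:Int),(0:Int)) ++ rowCalc (L.drop (c+1))) :: R) (↑c)
        = List.replicate k (List.replicate n ((0:Int),(0:Int))) ++
          (List.replicate c ((0:Int),(0:Int)) ++ rowCalc (L.drop c)) :: R := by
      simp only [innerG]
      have hmv : PySem.List.pyGetD (PySem.List.pyGetD matrix (↑k) []) (↑c) 0
          = (matrix[k]'hk)[c]'(by omega) := by
        rw [PySem.List.pyGetD_natCast matrix k [], List.getD_eq_getElem _ _ hk,
          PySem.List.pyGetD_natCast, List.getD_eq_getElem _ _ (by omega)]
      rw [hmv]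
      by_cases hv : (matrix[k]'hk)[c]'(by omega) = 1
      · rw [if_neg (by simpa using hv)]
        rw [hLdropc, hLc, rowCalc]
        rw [if_pos hv, rep_succ_append]
      · rw [if_pos (by simpa using hv)]
        have hcur : PySem.List.pyGetD
            (List.replicate k (List.replicate n ((0:Int),(0:Int))) ++
              (List.replicate (c+1) ((0:Int),(0:Int)) ++ rowCalc (L.drop (c+1))) :: R) (↑k) []
            = List.replicate (c+1) ((0:Int),(0:Int)) ++ rowCalc (L.drop (c+1)) := by
          rw [PySem.List.pyGetD_natCast]
          have := repcons_getD k (List.replicate n ((0:Int),(0:Int)))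
            (List.replicate (c+1) ((0:Int),(0:Int)) ++ rowCalc (L.drop (c+1))) R
            ([] : List (Int × Int))
          simpa using this
        have hdown : (if (↑k : Int) < ↑n - 1 then
              1 + (PySem.List.pyGetD (PySem.List.pyGetD
                (List.replicate k (List.replicate n ((0:Int),(0:Int))) ++
                  (List.replicate (c+1) ((0:Int),(0:Int)) ++ rowCalc (L.drop (c+1))) :: R)
                ((↑k)+1) []) (↑c) ((0:Int),(0:Int))).1
            else 1) = 1 + (below[c]'(by omega)).1 := by
          by_cases hkn : k + 1 < n
          · rw [if_pos (by push_cast; omega)]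
            have h1 : ((↑k : Int) + 1) = ((k+1 : Nat) : Int) := by push_cast; ring
            rw [h1, PySem.List.pyGetD_natCast (n := k+1), repcons_getD_succ]
            have hRne : R ≠ [] := by
              intro h; rw [h] at hRlen; simp at hRlen; omega
            obtain ⟨hd, tl, hR⟩ := List.exists_cons_of_ne_nil hRne
            rw [hR]
            simp only [List.getD_cons_zero]
            have : below = hd := by rw [hbdef, hR]; rfl
            rw [PySem.List.pyGetD_natCast, ← this,
              List.getD_eq_getElem _ _ (by omega : c < below.length)]
          · rw [if_neg (by push_cast; omega)]
            have hdropnil : matrix.drop (k+1) = [] := by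
              apply List.drop_eq_nil_of_le; omega
            have hRnil : R = [] := by rw [hRdef, hdropnil]; rfl
            have hbz : below = List.replicate n ((0:Int),(0:Int)) := by rw [hbdef, hRnil]; rfl
            have hbc0 : below[c]'(by omega) = ((0:Int),(0:Int)) := by simp [hbz]
            rw [hbc0]
            norm_num
        have hright : (if (↑c : Int) < ↑n - 1 then
              1 + (PySem.List.pyGetD
                (List.replicate (c+1) ((0:Int),(0:Int)) ++ rowCalc (L.drop (c+1)))
                ((↑c)+1) ((0:Int),(0:Int))).2
            else 1) = 1 + ((rowCalc (L.drop (c+1))).headD ((0:Int),(0:Int))).2 := by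
          by_cases hcn1 : c + 1 < n
          · rw [if_pos (by push_cast; omega)]
            have h1 : ((↑c : Int) + 1) = ((c+1 : Nat) : Int) := by push_cast; ring
            rw [h1, PySem.List.pyGetD_natCast (n := c+1)]
            have : (List.replicate (c+1) ((0:Int),(0:Int)) ++ rowCalc (L.drop (c+1))).getD (c+1)
                ((0:Int),(0:Int)) = (rowCalc (L.drop (c+1))).getD 0 ((0:Int),(0:Int)) := by
              rw [List.getD_eq_getElem?_getD, List.getElem?_append_right (by simp),
                ← List.getD_eq_getElem?_getD]
              simp
            rw [this, getD_zero_headD]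
          · rw [if_neg (by push_cast; omega)]
            have : L.drop (c+1) = [] := by
              apply List.drop_eq_nil_of_le; omega
            rw [this, rowCalc]
            rfl
        rw [hcur, hdown, hright, PySem.List.pySetD_natCast (n := c),
          PySem.List.pySetD_natCast (n := k)]
        have hset2 : (List.replicate (c+1) ((0:Int),(0:Int)) ++ rowCalc (L.drop (c+1))).set c
              (1 + (below[c]'(by omega)).1, 1 + ((rowCalc (L.drop (c+1))).headD ((0:Int),(0:Int))).2)
            = List.replicate c ((0:Int),(0:Int)) ++
              (1 + (below[c]'(by omega)).1, 1 + ((rowCalc (L.drop (c+1))).headD ((0:Int),(0:Int))).2)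
                :: rowCalc (L.drop (c+1)) := by
          rw [rep_succ_append, repcons_set]
        rw [hset2, repcons_set]
        rw [hLdropc, hLc, rowCalc, if_neg hv]
    rw [hstep]
    exact ih (by omega)

theorem outer_inv (matrix : List (List Int))
    (hpre : ∀ row ∈ matrix, matrix.length ≤ row.length) :
    ∀ k : Nat, k ≤ matrix.length →
      (PySem.List.pyRange ((k:Int) - 1) (-1) (-1)).foldl (fun nm row =>
          (PySem.List.pyRange ((matrix.length:Int) - 1) (-1) (-1)).foldl
            (innerG matrix (↑matrix.length) row) nm)
        (List.replicate k (List.replicate matrix.length ((0:Int),(0:Int))) ++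
          specGo matrix.length (matrix.drop k))
      = specGo matrix.length matrix := by
  intro k
  induction k with
  | zero =>
    intro _
    rw [show ((0:Nat):Int) - 1 = -1 by norm_num, PySem.List.pyRange_neg_one_eq_nil le_rfl]
    simp
  | succ k ih =>
    intro hk
    have hkn : k < matrix.length := hk
    have hcast : ((k+1 : Nat) : Int) - 1 = ((k : Nat) : Int) := by push_cast; ring
    have h2 : (PySem.List.pyRange ((matrix.length:Int) - 1) (-1) (-1)).foldl
          (innerG matrix (↑matrix.length) ((k:Nat):Int))
          (List.replicate (k+1) (List.replicate matrix.length ((0:Int),(0:Int))) ++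
            specGo matrix.length (matrix.drop (k+1)))
        = List.replicate k (List.replicate matrix.length ((0:Int),(0:Int))) ++
          specGo matrix.length (matrix.drop k) := by
      have hdropk : matrix.drop k = (matrix[k]'hkn) :: matrix.drop (k+1) :=
        List.drop_eq_getElem_cons hkn
      have hspec : specGo matrix.length (matrix.drop k)
          = rowCalc (((matrix[k]'hkn).take matrix.length).zip
              ((specGo matrix.length (matrix.drop (k+1))).headD
                (List.replicate matrix.length ((0:Int),(0:Int))))) ::
            specGo matrix.length (matrix.drop (k+1)) := by
        rw [hdropk, specGo]
      have hLnil : (((matrix[k]'hkn).take matrix.length).zip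
            ((specGo matrix.length (matrix.drop (k+1))).headD
              (List.replicate matrix.length ((0:Int),(0:Int))))).drop matrix.length = [] := by
        apply List.drop_eq_nil_of_le
        rw [List.length_zip, List.length_take]
        omega
      have hstart : List.replicate (k+1) (List.replicate matrix.length ((0:Int),(0:Int))) ++
            specGo matrix.length (matrix.drop (k+1))
          = List.replicate k (List.replicate matrix.length ((0:Int),(0:Int))) ++
            (List.replicate matrix.length ((0:Int),(0:Int)) ++
              rowCalc ((((matrix[k]'hkn).take matrix.length).zip
                ((specGo matrix.length (matrix.drop (k+1))).headD
                  (List.replicate matrix.length ((0:Int),(0:Int))))).drop matrix.length)) ::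
            specGo matrix.length (matrix.drop (k+1)) := by
        rw [hLnil, rowCalc, List.append_nil, rep_succ_append]
      rw [hstart, inner_inv matrix hpre k hkn matrix.length le_rfl, hspec]
    rw [hcast, PySem.List.pyRange_neg_one_cons (by omega : (-1:Int) < ((k:Nat):Int)),
      List.foldl_cons, h2]
    exact ih (by omega)

theorem A_eq_spec (matrix : List (List Int))
    (hpre : ∀ row ∈ matrix, matrix.length ≤ row.length) :
    createHelperMatrix matrix = specGo matrix.length matrix := by
  rw [A_unfold, PySem.List.len_eq, map_const_pyRange, map_const_pyRange]
  have h := outer_inv matrix hpre matrix.length le_rfl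
  rw [show matrix.drop matrix.length = [] from List.drop_eq_nil_of_le le_rfl] at h
  rw [specGo] at h
  rw [List.append_nil] at h
  exact h

-- ===== VERDICT (by name: the statement is the Claim_ definition above) =====
theorem createHelperMatrix_spec : Claim_equal_createHelperMatrix := by
  intro matrix _ hpre
  unfold Spec_createHelperMatrix
  rw [A_eq_spec matrix hpre, alt_eq_spec matrix hpre]
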